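-- pv_equiv track=rewrite | github.com/luluwsng0916/python | dat_file_viewer.py | generate_ruler_markers
-- ===== SOURCE A (Python) =====
-- def generate_ruler_markers(start_pos, length):
--     """
--     生成标尺标记线：
--     - 10的倍数位置用 | 标记
--     - 5的倍数位置用 + 标记
--     - 其他位置用 - 标记
--     """
--     markers = []
--     for i in range(length):
--         pos = start_pos + i
--         if pos % 10 == 0:
--             markers.append('|')
--         elif pos % 5 == 0:
--             markers.append('+')
--         else:
--             markers.append('-')
--     return ''.join(markers)
-- ===== SOURCE B (Python) =====
-- def generate_ruler_markers(start_pos, length):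
--     if length <= 0:
--         return ""
--     pattern = "|----+----"
--     offset = start_pos % 10
--     reps = (offset + length + 9) // 10
--     return (pattern * reps)[offset:offset + length]
-- ===== Notes on version B (the rewrite author's own statement) =====
-- stated objective: faster
-- what changed: Replaces the per-position conditional loop with a closed-form construction: the marker depends only on position mod 10, so B tiles the fixed 10-character pattern '|----+----' and returns one slice [offset:offset+length].
import Mathlib
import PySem

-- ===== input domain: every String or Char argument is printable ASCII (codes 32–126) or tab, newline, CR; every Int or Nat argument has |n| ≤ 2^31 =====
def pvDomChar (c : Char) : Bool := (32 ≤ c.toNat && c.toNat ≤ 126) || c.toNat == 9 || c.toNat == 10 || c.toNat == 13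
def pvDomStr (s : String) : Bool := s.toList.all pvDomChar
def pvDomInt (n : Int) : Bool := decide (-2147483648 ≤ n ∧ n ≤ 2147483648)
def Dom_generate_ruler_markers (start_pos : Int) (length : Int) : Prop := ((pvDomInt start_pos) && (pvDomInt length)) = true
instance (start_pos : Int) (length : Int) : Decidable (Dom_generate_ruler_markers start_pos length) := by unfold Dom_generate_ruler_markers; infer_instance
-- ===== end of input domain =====

-- B replaces A's per-position conditional loop with one tiling of the fixed period-10
-- pattern and a single slice (different decomposition; return value only, no side effects).

-- ===== PORT A =====
def generate_ruler_markers (start_pos : Int) (length : Int) : String :=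
  let markers : List Char :=
    (PySem.List.pyRange 0 length 1).foldl
      (fun acc i =>
        let pos := start_pos + i
        if PySem.Int.mod pos 10 = 0 then acc ++ ['|']
        else if PySem.Int.mod pos 5 = 0 then acc ++ ['+']
        else acc ++ ['-']) []
  String.ofList markers

-- ===== PORT B =====
def generate_ruler_markers_alt (start_pos : Int) (length : Int) : String :=
  if length ≤ 0 then "" else
    let pattern : List Char := "|----+----".toList
    let offset : Int := PySem.Int.mod start_pos 10
    let reps : Int := PySem.Int.floordiv (offset + length + 9) 10
    String.ofList
      (PySem.List.slice ((List.replicate reps.toNat pattern).flatten)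
        (some offset) (some (offset + length)))

-- ===== PRECONDITION & SPEC =====
def Spec_generate_ruler_markers (start_pos : Int) (length : Int) (out : String) : Prop := out = generate_ruler_markers_alt start_pos length
instance (start_pos : Int) (length : Int) (out : String) : Decidable (Spec_generate_ruler_markers start_pos length out) := by unfold Spec_generate_ruler_markers; infer_instance

-- ===== CLAIM (what is proved, stated in full; the proofs are below) =====
def Claim_equal_generate_ruler_markers : Prop := ∀ (start_pos : Int) (length : Int), Dom_generate_ruler_markers start_pos length → Spec_generate_ruler_markers start_pos length (generate_ruler_markers start_pos length)

-- ===== LEMMAS AND PROOFS =====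

-- the marker character at absolute position v, as A computes it
def pvMark (v : Int) : Char :=
  if PySem.Int.mod v 10 = 0 then '|'
  else if PySem.Int.mod v 5 = 0 then '+'
  else '-'

-- the fixed 10-character period pattern of B
def pvPat : List Char := "|----+----".toList

theorem pvMod5 (a : Int) : PySem.Int.mod a 5 = a % 5 :=
  PySem.Int.mod_eq_emod_of_pos (by norm_num)

theorem pvMod10 (a : Int) : PySem.Int.mod a 10 = a % 10 :=
  PySem.Int.mod_eq_emod_of_pos (by norm_num)

-- A's fold is a map of pvMark over the range
theorem pvA_eq_map (s l : Int) :
    ((PySem.List.pyRange 0 l 1).foldl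
      (fun acc i =>
        let pos := s + i
        if PySem.Int.mod pos 10 = 0 then acc ++ ['|']
        else if PySem.Int.mod pos 5 = 0 then acc ++ ['+']
        else acc ++ ['-']) [])
    = (PySem.List.pyRange 0 l 1).map (fun i => pvMark (s + i)) := by
  have hfun : (fun (acc : List Char) (i : Int) =>
        let pos := s + i
        if PySem.Int.mod pos 10 = 0 then acc ++ ['|']
        else if PySem.Int.mod pos 5 = 0 then acc ++ ['+']
        else acc ++ ['-'])
      = (fun (acc : List Char) (i : Int) => acc ++ [pvMark (s + i)]) := by
    funext acc i
    simp only [pvMark]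
    split_ifs <;> rfl
  rw [hfun, PySem.List.foldl_append_singleton_eq_map]
  simp

-- pvMark reads only the residue mod 10, as an index into pvPat
theorem pvMark_eq_pat (v : Int) :
    pvMark v = pvPat.getD (PySem.Int.mod v 10).toNat ' ' := by
  have h5 : PySem.Int.mod v 5 = PySem.Int.mod (PySem.Int.mod v 10) 5 := by
    simp only [pvMod5, pvMod10]
    exact (Int.emod_emod_of_dvd v (by norm_num)).symm
  have hb0 : 0 ≤ PySem.Int.mod v 10 := PySem.Int.mod_nonneg v (by norm_num)
  have hb1 : PySem.Int.mod v 10 < 10 := PySem.Int.mod_lt v (by norm_num)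
  unfold pvMark
  rw [h5]
  generalize h : PySem.Int.mod v 10 = r at hb0 hb1 ⊢
  interval_cases r <;> decide

-- element of a tiling of pvPat: position j reads pvPat at j mod 10
theorem pvFlatten_getD (n j : Nat) (hj : j < 10 * n) :
    (List.replicate n pvPat).flatten.getD j ' ' = pvPat.getD (j % 10) ' ' := by
  induction n generalizing j with
  | zero => omega
  | succ m ih =>
    have hlen : pvPat.length = 10 := by decide
    rw [List.replicate_succ, List.flatten_cons]
    by_cases h : j < 10
    · rw [List.getD_append _ _ _ _ (by omega)]
      congr 1
      omega
    · rw [List.getD_append_right _ _ _ _ (by omega)]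
      rw [hlen, ih (j - 10) (by omega)]
      congr 1
      omega

theorem pvFlatten_len (n : Nat) : (List.replicate n pvPat).flatten.length = 10 * n := by
  simp [List.length_flatten, pvPat]
  omega

-- shifting the base by its own mod-10 residue preserves mod 10
theorem pvMod_shift (s i : Int) :
    PySem.Int.mod (s + i) 10 = PySem.Int.mod (PySem.Int.mod s 10 + i) 10 := by
  simp only [pvMod10]
  omega

-- ===== VERDICT (by name: the statement is the Claim_ definition above) =====
theorem generate_ruler_markers_spec : Claim_equal_generate_ruler_markers := by
  intro s l _
  unfold Spec_generate_ruler_markers generate_ruler_markers generate_ruler_markers_alt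
  by_cases hl : l ≤ 0
  · simp only [hl, if_pos]
    rw [pvA_eq_map, PySem.List.pyRange_one_eq_nil (by omega)]
    rfl
  · simp only [hl, if_false]
    rw [pvA_eq_map]
    rw [show "|----+----".toList = pvPat from rfl]
    have hl' : 0 < l := by omega
    set off := PySem.Int.mod s 10 with hoff
    have hoff0 : 0 ≤ off := PySem.Int.mod_nonneg s (by norm_num)
    have hoff1 : off < 10 := PySem.Int.mod_lt s (by norm_num)
    set reps := PySem.Int.floordiv (off + l + 9) 10 with hreps
    have hm0 : 0 ≤ PySem.Int.mod (off + l + 9) 10 :=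
      PySem.Int.mod_nonneg (off + l + 9) (by norm_num)
    have hm1 : PySem.Int.mod (off + l + 9) 10 < 10 :=
      PySem.Int.mod_lt (off + l + 9) (by norm_num)
    have hdm := PySem.Int.floordiv_mul_add_mod (off + l + 9) 10
    rw [← hreps] at hdm
    have hreps_ge : off + l ≤ 10 * reps := by omega
    have hreps0 : 0 ≤ reps := by nlinarith
    have hflen : ((List.replicate reps.toNat pvPat).flatten).length = 10 * reps.toNat :=
      pvFlatten_len reps.toNat
    rw [PySem.List.slice_toNat _ hoff0 (by omega)]
    congr 1
    apply List.ext_getElem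
    · rw [List.length_map, PySem.List.length_pyRange_one,
          List.length_take, List.length_drop, hflen]
      omega
    · intro k h1 h2
      have hkl : (k : Int) < l := by
        rw [List.length_map, PySem.List.length_pyRange_one] at h1
        omega
      rw [List.getElem_map, PySem.List.getElem_pyRange_one]
      simp only [zero_add]
      rw [List.getElem_take, List.getElem_drop]
      have hidx : off.toNat + k < 10 * reps.toNat := by omega
      have hflat := pvFlatten_getD reps.toNat (off.toNat + k) hidx
      rw [List.getD_eq_getElem _ _ (by omega)] at hflat
      rw [hflat, pvMark_eq_pat]
      have hp0 : 0 ≤ PySem.Int.mod (s + (k:Int)) 10 :=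
        PySem.Int.mod_nonneg _ (by norm_num)
      have hp1 : PySem.Int.mod (s + (k:Int)) 10 < 10 :=
        PySem.Int.mod_lt _ (by norm_num)
      congr 1
      rw [pvMod_shift, ← hoff, pvMod10]
      omega
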